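-- pv_equiv track=rewrite | github.com/vhsw/CodeMasters_Tourney | Python 3/maxGCD.py | maxGCD
-- ===== SOURCE A (Python) =====
-- def maxGCD(sequence):
--     def gcd(a, b):
--         if b == 0:
--             return a
--         return gcd(b, a % b)
--
--     bestRes = 0
--
--     for i in range(len(sequence)):
--         result = sequence[0]
--         if not i:
--             result = sequence[1]
--         for j in range(len(sequence)):
--             if i == j:
--                 continue
--             result = gcd(result, sequence[j])
--         if result > bestRes:
--             bestRes = result
--
--     return bestRes
-- ===== SOURCE B (Python) =====
-- def maxGCD(sequence):
--     # O(n) pass with prefix/suffix gcd arrays instead of A's O(n^2) nested loops.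
--     def g(a, b):
--         while b:
--             a, b = b, a % b
--         return a
--
--     n = len(sequence)
--     if n == 0:
--         return 0
--     pre = [sequence[0]]
--     for x in sequence[1:]:
--         pre.append(g(pre[-1], x))
--     suf = [sequence[-1]]
--     for x in reversed(sequence[:-1]):
--         suf.append(g(x, suf[-1]))
--     suf.reverse()
--     best = 0
--     for i in range(n):
--         if i == 0:
--             r = suf[1]
--         elif i == n - 1:
--             r = pre[i - 1]
--         else:
--             r = g(pre[i - 1], suf[i + 1])
--         if r > best:
--             best = r
--     return best
-- ===== Notes on version B (the rewrite author's own statement) =====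
-- stated objective: faster
-- what changed: A recomputes the gcd of all other elements from scratch for every excluded index (nested loops); B builds prefix and suffix gcd arrays in one pass each and combines pre[i-1] with suf[i+1] per index.
import Mathlib
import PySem

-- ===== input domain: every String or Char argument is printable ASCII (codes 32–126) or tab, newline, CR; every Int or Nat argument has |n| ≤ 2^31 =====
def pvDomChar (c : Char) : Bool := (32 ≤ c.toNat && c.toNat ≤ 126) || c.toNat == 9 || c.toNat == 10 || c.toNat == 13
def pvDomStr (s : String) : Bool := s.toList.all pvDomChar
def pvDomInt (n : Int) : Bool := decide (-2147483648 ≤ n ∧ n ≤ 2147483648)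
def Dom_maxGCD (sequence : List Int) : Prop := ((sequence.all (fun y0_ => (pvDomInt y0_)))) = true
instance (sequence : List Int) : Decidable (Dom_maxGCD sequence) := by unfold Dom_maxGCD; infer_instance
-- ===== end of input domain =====

-- B replaces A's O(n^2) nested loops by prefix/suffix gcd arrays combined once per excluded index (O(n) gcd calls).

-- termination measure for the Euclidean recursion (cited by pygcd's decreasing_by)
theorem pygcd_dec (a b : Int) (h : ¬ b = 0) : (PySem.Int.mod a b).natAbs < b.natAbs := by
  rcases lt_or_gt_of_ne h with hb | hb
  · have := PySem.Int.mod_neg_bounds a hb; omega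
  · have h1 := PySem.Int.mod_nonneg a hb; have h2 := PySem.Int.mod_lt a hb; omega

-- the gcd helper both Pythons define (A recursively, B as the equivalent while loop)
def pygcd (a b : Int) : Int :=
  if h : b = 0 then a else pygcd b (PySem.Int.mod a b)
termination_by b.natAbs
decreasing_by exact pygcd_dec a b h

-- ===== PORT A =====
def maxGCD (sequence : List Int) : Int :=
  (PySem.List.pyRange 0 sequence.length 1).foldl
    (fun bestRes i =>
      let result0 : Int :=
        if i = 0 then PySem.List.pyGetD sequence 1 0 else PySem.List.pyGetD sequence 0 0
      let result := (PySem.List.pyRange 0 sequence.length 1).foldl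
        (fun result j =>
          if i = j then result else pygcd result (PySem.List.pyGetD sequence j 0))
        result0
      if result > bestRes then result else bestRes)
    0

-- ===== PORT B =====
def maxGCD_alt (sequence : List Int) : Int :=
  let n : Int := sequence.length
  if n = 0 then 0
  else
    let x0 := PySem.List.pyGetD sequence 0 0
    let pre := ((PySem.List.slice sequence (some 1) none).foldl
        (fun (p : Int × List Int) x => (pygcd p.1 x, p.2 ++ [pygcd p.1 x])) (x0, [x0])).2
    let xl := PySem.List.pyGetD sequence (-1) 0
    let suf := (((PySem.List.slice sequence none (some (-1))).reverse).foldl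
        (fun (p : Int × List Int) x => (pygcd x p.1, p.2 ++ [pygcd x p.1])) (xl, [xl])).2.reverse
    (PySem.List.pyRange 0 n 1).foldl
      (fun best i =>
        let r : Int :=
          if i = 0 then PySem.List.pyGetD suf 1 0
          else if i = n - 1 then PySem.List.pyGetD pre (i - 1) 0
          else pygcd (PySem.List.pyGetD pre (i - 1) 0) (PySem.List.pyGetD suf (i + 1) 0)
        if r > best then r else best)
      0

-- ===== PRECONDITION & SPEC =====
-- Pre_ excludes exactly the singleton lists, on which A raises IndexError (sequence[1]).
def Pre_maxGCD (sequence : List Int) : Prop := sequence.length ≠ 1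
instance (sequence : List Int) : Decidable (Pre_maxGCD sequence) := by unfold Pre_maxGCD; infer_instance
def pvWitness_maxGCD : List Int := [4, 6]
def Spec_maxGCD (sequence : List Int) (out : Int) : Prop := out = maxGCD_alt sequence
instance (sequence : List Int) (out : Int) : Decidable (Spec_maxGCD sequence out) := by unfold Spec_maxGCD; infer_instance

-- ===== CLAIM (what is proved, stated in full; the proofs are below) =====
def Claim_equal_maxGCD : Prop := ∀ (sequence : List Int), Dom_maxGCD sequence → Pre_maxGCD sequence → Spec_maxGCD sequence (maxGCD sequence)

-- ===== LEMMAS AND PROOFS =====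

theorem pygcd_zero (a : Int) : pygcd a 0 = a := by rw [pygcd]; simp

theorem pygcd_self (a : Int) : pygcd a a = a := by
  rw [pygcd]
  by_cases h : a = 0
  · simp [h]
  · simp only [h, dite_false]
    have : PySem.Int.mod a a = 0 := (PySem.Int.mod_eq_zero_iff_dvd a a).mpr dvd_rfl
    rw [this, pygcd_zero]

theorem pygcd_char_aux (n : Nat) : ∀ a b : Int, b.natAbs = n → b ≠ 0 → pygcd a b = b.sign * Int.gcd a b := by
  induction n using Nat.strong_induction_on with
  | _ n ih =>
    intro a b hn hb
    rw [pygcd]; simp only [hb, dite_false]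
    have hgcd : Int.gcd b (PySem.Int.mod a b) = Int.gcd a b := by
      have hm : PySem.Int.mod a b = a - PySem.Int.floordiv a b * b := by
        have := PySem.Int.floordiv_mul_add_mod a b; omega
      rw [hm, Int.gcd_sub_mul_right_right, Int.gcd_comm]
    by_cases hr0 : PySem.Int.mod a b = 0
    · rw [hr0, pygcd_zero]
      have hdvd : b ∣ a := (PySem.Int.mod_eq_zero_iff_dvd a b).mp hr0
      rw [Int.gcd_eq_natAbs_right_iff_dvd.mpr hdvd]
      exact (Int.sign_mul_natAbs b).symm
    · have hlt : (PySem.Int.mod a b).natAbs < n := hn ▸ pygcd_dec a b hb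
      rw [ih _ hlt b _ rfl hr0, hgcd]
      congr 1
      rcases lt_or_gt_of_ne hb with hbneg | hbpos
      · have := PySem.Int.mod_neg_bounds a hbneg
        rw [Int.sign_eq_neg_one_iff_neg.mpr (by omega), Int.sign_eq_neg_one_iff_neg.mpr hbneg]
      · have h1 := PySem.Int.mod_nonneg a hbpos
        rw [Int.sign_eq_one_iff_pos.mpr (by omega), Int.sign_eq_one_iff_pos.mpr hbpos]

theorem pygcd_char (a b : Int) (hb : b ≠ 0) : pygcd a b = b.sign * Int.gcd a b :=
  pygcd_char_aux b.natAbs a b rfl hb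

theorem gcd_ne_zero_right (a b : Int) (hb : b ≠ 0) : Int.gcd a b ≠ 0 := by
  intro h
  exact hb (Int.gcd_eq_zero_iff.mp h).2

theorem pygcd_ne_zero (a b : Int) (hb : b ≠ 0) : pygcd a b ≠ 0 := by
  rw [pygcd_char a b hb]
  intro h
  rcases mul_eq_zero.mp h with h | h
  · exact hb (Int.sign_eq_zero_iff_zero.mp h)
  · exact gcd_ne_zero_right a b hb (by exact_mod_cast h)

theorem natAbs_pygcd (a b : Int) (hb : b ≠ 0) : (pygcd a b).natAbs = Int.gcd a b := by
  rw [pygcd_char a b hb, Int.natAbs_mul, Int.natAbs_sign_of_ne_zero hb, one_mul, Int.natAbs_natCast]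

theorem sign_pygcd (a b : Int) (hb : b ≠ 0) : (pygcd a b).sign = b.sign := by
  rw [pygcd_char a b hb, Int.sign_mul, Int.sign_natCast_of_ne_zero (gcd_ne_zero_right a b hb), mul_one,
      Int.sign_sign]

theorem pygcd_assoc (a b c : Int) : pygcd (pygcd a b) c = pygcd a (pygcd b c) := by
  by_cases hc : c = 0
  · rw [hc, pygcd_zero, pygcd_zero]
  by_cases hb : b = 0
  · rw [hb, pygcd_zero, pygcd_char 0 c hc, Int.gcd_zero_left, Int.sign_mul_natAbs]
  · have hw : pygcd b c ≠ 0 := pygcd_ne_zero b c hc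
    rw [pygcd_char _ c hc, pygcd_char a _ hw, pygcd_char a b hb, sign_pygcd b c hc]
    congr 1
    rw [Int.gcd_eq_natAbs_gcd_natAbs, Int.gcd_eq_natAbs_gcd_natAbs a (pygcd b c)]
    rw [Int.natAbs_mul, Int.natAbs_sign_of_ne_zero hb, one_mul, Int.natAbs_natCast,
        natAbs_pygcd b c hc]
    -- done below
    exact_mod_cast congrArg Nat.cast (Nat.gcd_assoc a.natAbs b.natAbs c.natAbs)

-- gcd of a nonempty list, the common value both programs compute per excluded index
def PL (m : List Int) : Int :=
  match m with
  | [] => 0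
  | x :: t => t.foldl pygcd x

theorem foldl_eq_pygcd_PL (x y : Int) (t : List Int) :
    (y :: t).foldl pygcd x = pygcd x (PL (y :: t)) := by
  haveI : Std.Associative pygcd := ⟨pygcd_assoc⟩
  simpa [PL] using (List.foldl_assoc (l := t) (a₁ := x) (a₂ := y))

theorem PL_cons_self (x : Int) (t : List Int) : (x :: t).foldl pygcd x = PL (x :: t) := by
  simp [PL, pygcd_self]

theorem PL_append (m1 m2 : List Int) (h1 : m1 ≠ []) (h2 : m2 ≠ []) :
    PL (m1 ++ m2) = pygcd (PL m1) (PL m2) := by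
  match m1, m2 with
  | x :: t, y :: u =>
    simp only [PL, List.cons_append, List.foldl_append]
    rw [foldl_eq_pygcd_PL (t.foldl pygcd x) y u]
    rfl

theorem pairFoldPre (l : List Int) : ∀ (a : Int) (acc : List Int),
    l.foldl (fun p x => (pygcd p.1 x, p.2 ++ [pygcd p.1 x])) (a, acc)
    = (l.foldl pygcd a, acc ++ (List.range l.length).map (fun k => (l.take (k+1)).foldl pygcd a)) := by
  induction l with
  | nil => simp
  | cons x t ih =>
    intro a acc
    simp only [List.foldl_cons, ih, List.length_cons, List.range_succ_eq_map, List.map_cons,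
      List.map_map, List.take_succ_cons, List.append_assoc]
    simp [Function.comp_def]

theorem PL_append_pair (m : List Int) (y s : Int) : PL (m ++ [y, s]) = PL (m ++ [pygcd y s]) := by
  cases m with
  | nil => simp [PL]
  | cons z w => simp [PL, List.foldl_append, pygcd_assoc]

theorem flip_foldl (m : List Int) : ∀ s : Int, m.foldl (fun a x => pygcd x a) s = PL (m.reverse ++ [s]) := by
  induction m with
  | nil => intro s; simp [PL]
  | cons y t ih =>
    intro s
    simp only [List.foldl_cons, ih, List.reverse_cons, List.append_assoc]
    exact (PL_append_pair t.reverse y s).symm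

theorem pairFoldSuf (l : List Int) : ∀ (a : Int) (acc : List Int),
    l.foldl (fun p x => (pygcd x p.1, p.2 ++ [pygcd x p.1])) (a, acc)
    = (l.foldl (fun a x => pygcd x a) a,
       acc ++ (List.range l.length).map (fun k => (l.take (k+1)).foldl (fun a x => pygcd x a) a)) := by
  induction l with
  | nil => simp
  | cons x t ih =>
    intro a acc
    simp only [List.foldl_cons, ih, List.length_cons, List.range_succ_eq_map, List.map_cons,
      List.map_map, List.take_succ_cons, List.append_assoc]
    simp [Function.comp_def]

-- pre as the list of prefix gcds
theorem pre_char (x0 : Int) (t : List Int) :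
    ((t.foldl (fun (p : Int × List Int) x => (pygcd p.1 x, p.2 ++ [pygcd p.1 x])) (x0, [x0])).2)
    = (List.range (t.length + 1)).map (fun k => PL ((x0 :: t).take (k+1))) := by
  rw [pairFoldPre]
  simp only [List.range_succ_eq_map, List.map_cons, List.map_map, List.take_succ_cons,
    List.singleton_append, Function.comp_def, PL, Nat.succ_eq_add_one, List.take_zero,
    List.foldl_nil]

theorem reverse_map_range (m : Nat) (f : Nat → Int) :
    ((List.range m).map f).reverse = (List.range m).map (fun k => f (m - 1 - k)) := by
  apply List.ext_getElem
  · simp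
  · intro i h1 h2
    simp only [List.getElem_reverse, List.length_map, List.length_range,
      List.getElem_map, List.getElem_range]

theorem drop_dropLast_concat (xs : List Int) (h : xs ≠ []) (i : Nat) (hi : i ≤ xs.length - 1) :
    xs.dropLast.drop i ++ [xs.getLast h] = xs.drop i := by
  conv_rhs => rw [← List.dropLast_concat_getLast h]
  rw [List.drop_append_of_le_length (by simp; omega)]

-- suffix gcds: element k of suf is PL (xs.drop k)
theorem suf_char (xs : List Int) (h : xs ≠ []) :
    ((((xs.dropLast).reverse).foldl
        (fun (p : Int × List Int) x => (pygcd x p.1, p.2 ++ [pygcd x p.1]))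
        (xs.getLast h, [xs.getLast h])).2).reverse
    = (List.range xs.length).map (fun k => PL (xs.drop k)) := by
  have hlen : 1 ≤ xs.length := List.length_pos_of_ne_nil h
  rw [pairFoldSuf]
  have hm : xs.dropLast.reverse.length = xs.length - 1 := by simp
  simp only [List.singleton_append]
  rw [List.reverse_cons, hm, reverse_map_range]
  have hrange : List.range xs.length = List.range (xs.length - 1) ++ [xs.length - 1] := by
    have : xs.length = (xs.length - 1) + 1 := by omega
    rw [this, List.range_succ]
    simp
  rw [hrange, List.map_append]
  congr 1
  · apply List.map_congr_left
    intro k hk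
    rw [List.mem_range] at hk
    rw [flip_foldl]
    have hstep : xs.dropLast.reverse.take (xs.length - 1 - 1 - k + 1) = (xs.dropLast.drop k).reverse := by
      rw [List.take_reverse]
      congr 1
      congr 1
      simp
      omega
    rw [hstep, List.reverse_reverse, drop_dropLast_concat xs h k (by omega)]
  · simp only [List.map_cons, List.map_nil]
    congr 1
    have : xs.drop (xs.length - 1) = [xs.getLast h] := by
      rw [← drop_dropLast_concat xs h (xs.length - 1) (by omega)]
      rw [List.drop_of_length_le (by simp)]
      simp
    rw [this]
    simp [PL]


theorem map_pyGetD_take (xs : List Int) (i : Nat) (hi : i ≤ xs.length) :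
    (PySem.List.pyRange 0 (i : Int) 1).map (fun j => PySem.List.pyGetD xs j 0) = xs.take i := by
  have full := PySem.List.map_pyGetD_pyRange_zero' xs (0 : Int)
  rw [PySem.List.pyRange_one_append 0 (i : Int) (xs.length : Int) (by omega) (by exact_mod_cast hi),
      List.map_append, PySem.List.map_pyGetD_pyRange' xs 0 (by omega : (0:Int) ≤ (i:Int))] at full
  simp only [Int.toNat_natCast] at full
  exact List.append_cancel_right (by rw [full, List.take_append_drop])

theorem A_inner (xs : List Int) (i : Nat) (hi : i < xs.length) (s : Int) :
    (PySem.List.pyRange 0 (xs.length : Int) 1).foldl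
      (fun r j => if (i : Int) = j then r else pygcd r (PySem.List.pyGetD xs j 0)) s
    = (xs.eraseIdx i).foldl pygcd s := by
  rw [List.eraseIdx_eq_take_drop_succ,
      PySem.List.pyRange_one_append 0 (i : Int) (xs.length : Int) (by omega) (by exact_mod_cast hi.le),
      PySem.List.pyRange_one_cons (a := (i : Int)) (b := (xs.length : Int)) (by exact_mod_cast hi),
      List.foldl_append, List.foldl_cons, if_pos rfl]
  have hseg1 : (PySem.List.pyRange 0 (i : Int) 1).foldl
      (fun r j => if (i : Int) = j then r else pygcd r (PySem.List.pyGetD xs j 0)) s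
      = (PySem.List.pyRange 0 (i : Int) 1).foldl
      (fun r j => pygcd r (PySem.List.pyGetD xs j 0)) s := by
    apply PySem.List.foldl_congr_mem
    intro acc x hx
    have := (PySem.List.mem_pyRange_one).mp hx
    rw [if_neg (by omega)]
  have hseg2 : ∀ s' : Int, (PySem.List.pyRange ((i : Int) + 1) (xs.length : Int) 1).foldl
      (fun r j => if (i : Int) = j then r else pygcd r (PySem.List.pyGetD xs j 0)) s'
      = (PySem.List.pyRange ((i : Int) + 1) (xs.length : Int) 1).foldl
      (fun r j => pygcd r (PySem.List.pyGetD xs j 0)) s' := by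
    intro s'
    apply PySem.List.foldl_congr_mem
    intro acc x hx
    have := (PySem.List.mem_pyRange_one).mp hx
    rw [if_neg (by omega)]
  rw [hseg1, hseg2]
  have e1 : (PySem.List.pyRange 0 (i : Int) 1).foldl
      (fun r j => pygcd r (PySem.List.pyGetD xs j 0)) s = (xs.take i).foldl pygcd s := by
    rw [← map_pyGetD_take xs i hi.le, List.foldl_map]
  have e2 : ∀ s' : Int, (PySem.List.pyRange ((i : Int) + 1) (xs.length : Int) 1).foldl
      (fun r j => pygcd r (PySem.List.pyGetD xs j 0)) s' = (xs.drop (i+1)).foldl pygcd s' := by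
    intro s'
    have hmap := PySem.List.map_pyGetD_pyRange' xs 0 (by omega : (0:Int) ≤ (i:Int) + 1)
    have : ((i : Int) + 1).toNat = i + 1 := by omega
    rw [this] at hmap
    rw [← hmap, List.foldl_map]
  rw [e1, e2, ← List.foldl_append]

theorem A_result (x0 x1 : Int) (rest : List Int) (i : Nat) (hi : i < (x0::x1::rest).length) :
    ((x0::x1::rest).eraseIdx i).foldl pygcd
      (if (i : Int) = 0 then PySem.List.pyGetD (x0::x1::rest) 1 0
       else PySem.List.pyGetD (x0::x1::rest) 0 0)
    = PL ((x0::x1::rest).eraseIdx i) := by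
  cases i with
  | zero =>
    rw [if_pos (by norm_num)]
    have h1 : PySem.List.pyGetD (x0::x1::rest) 1 0 = x1 := by
      simp [pysem]
    rw [h1]
    exact PL_cons_self x1 rest
  | succ k =>
    rw [if_neg (by omega), PySem.List.pyGetD_zero_cons, List.eraseIdx_cons_succ]
    exact PL_cons_self x0 _

theorem B_cand (xs : List Int) (hn : 2 ≤ xs.length) (iN : Nat) (hi : iN < xs.length) :
    (if (iN : Int) = 0 then
        PySem.List.pyGetD ((List.range xs.length).map (fun k => PL (xs.drop k))) 1 0
     else if (iN : Int) = (xs.length : Int) - 1 then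
        PySem.List.pyGetD ((List.range xs.length).map (fun k => PL (xs.take (k+1)))) ((iN : Int) - 1) 0
     else
        pygcd (PySem.List.pyGetD ((List.range xs.length).map (fun k => PL (xs.take (k+1)))) ((iN : Int) - 1) 0)
              (PySem.List.pyGetD ((List.range xs.length).map (fun k => PL (xs.drop k))) ((iN : Int) + 1) 0))
    = PL (xs.eraseIdx iN) := by
  by_cases h0 : iN = 0
  · subst h0
    rw [if_pos (by norm_num)]
    have : (1 : Int) = ((1 : Nat) : Int) := by norm_num
    rw [this, PySem.List.pyGetD_natCast,
        PySem.List.getD_map_range (fun k => PL (xs.drop k)) xs.length 1 0 (by omega)]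
    rw [List.eraseIdx_zero, ← List.drop_one]
  · by_cases hlast : iN = xs.length - 1
    · rw [if_neg (by omega), if_pos (by omega)]
      have : (iN : Int) - 1 = ((iN - 1 : Nat) : Int) := by omega
      rw [this, PySem.List.pyGetD_natCast,
          PySem.List.getD_map_range (fun k => PL (xs.take (k+1))) xs.length (iN-1) 0 (by omega)]
      have h1 : iN - 1 + 1 = xs.length - 1 := by omega
      rw [h1, List.eraseIdx_eq_take_drop_succ]
      have h2 : xs.drop (iN + 1) = [] := List.drop_of_length_le (by omega)
      rw [h2, List.append_nil]
      rw [hlast]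
    · rw [if_neg (by omega), if_neg (by omega)]
      have e1 : (iN : Int) - 1 = ((iN - 1 : Nat) : Int) := by omega
      have e2 : (iN : Int) + 1 = ((iN + 1 : Nat) : Int) := by omega
      rw [e1, e2, PySem.List.pyGetD_natCast, PySem.List.pyGetD_natCast,
          PySem.List.getD_map_range (fun k => PL (xs.take (k+1))) xs.length (iN-1) 0 (by omega),
          PySem.List.getD_map_range (fun k => PL (xs.drop k)) xs.length (iN+1) 0 (by omega)]
      have h1 : iN - 1 + 1 = iN := by omega
      rw [h1, ← PL_append _ _
            (by intro hc
                have := congrArg List.length hc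
                rw [List.length_take] at this
                simp only [List.length_nil] at this
                omega)
            (by intro hc
                have := congrArg List.length hc
                rw [List.length_drop] at this
                simp only [List.length_nil] at this
                omega)]
      rw [← List.eraseIdx_eq_take_drop_succ]

theorem main_eq (xs : List Int) (h : xs.length ≠ 1) : maxGCD xs = maxGCD_alt xs := by
  match xs, h with
  | [], _ => rfl
  | x0 :: x1 :: rest, _ =>
    have hn : 2 ≤ (x0 :: x1 :: rest).length := by simp
    have hne : (x0 :: x1 :: rest) ≠ [] := by simp
    have hpre : ((PySem.List.slice (x0 :: x1 :: rest) (some 1) none).foldl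
        (fun (p : Int × List Int) x => (pygcd p.1 x, p.2 ++ [pygcd p.1 x]))
        (PySem.List.pyGetD (x0 :: x1 :: rest) 0 0, [PySem.List.pyGetD (x0 :: x1 :: rest) 0 0])).2
        = (List.range (x0 :: x1 :: rest).length).map (fun k => PL ((x0 :: x1 :: rest).take (k+1))) := by
      rw [PySem.List.slice_from_one, PySem.List.pyGetD_zero_cons]
      simpa using pre_char x0 (x1 :: rest)
    have hsuf : ((((PySem.List.slice (x0 :: x1 :: rest) none (some (-1))).reverse).foldl
        (fun (p : Int × List Int) x => (pygcd x p.1, p.2 ++ [pygcd x p.1]))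
        (PySem.List.pyGetD (x0 :: x1 :: rest) (-1) 0, [PySem.List.pyGetD (x0 :: x1 :: rest) (-1) 0])).2).reverse
        = (List.range (x0 :: x1 :: rest).length).map (fun k => PL ((x0 :: x1 :: rest).drop k)) := by
      rw [PySem.List.slice_to_neg_one, PySem.List.pyGetD_neg_one _ _ hne]
      exact suf_char (x0 :: x1 :: rest) hne
    simp only [maxGCD, maxGCD_alt]
    rw [if_neg (by omega), hpre, hsuf]
    apply PySem.List.foldl_congr_mem
    intro acc i hi
    obtain ⟨hi0, hi1⟩ := (PySem.List.mem_pyRange_one).mp hi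
    obtain ⟨k, rfl⟩ : ∃ k : Nat, i = (k : Int) := ⟨i.toNat, by omega⟩
    have hk : k < (x0 :: x1 :: rest).length := by exact_mod_cast hi1
    rw [A_inner _ k hk, A_result x0 x1 rest k hk, B_cand _ hn k hk]

-- ===== VERDICT (by name: the statement is the Claim_ definition above) =====
theorem maxGCD_spec : Claim_equal_maxGCD := by
  intro sequence _ hpre
  show maxGCD sequence = maxGCD_alt sequence
  exact main_eq sequence hpre
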